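-- pv_equiv track=rewrite | github.com/Fran-cois/MATILDA | src/algorithms/MATILDA/rule_types/fd_discovery.py | is_consistent_constraint_set
-- ===== SOURCE A (Python) =====
-- from collections import Counter, defaultdict
--
-- def is_consistent_constraint_set(eq_pairs):
--     """
--     Vérifie si un ensemble de contraintes d'égalité est cohérent.
--     Les contraintes peuvent être incohérentes si elles créent des cycles transitifs
--     qui conduisent à des égalités contradictoires.
--
--     :param eq_pairs: Liste de tuples (attr1, attr2) représentant des contraintes d'égalité
--     :return: True si l'ensemble est cohérent, False sinon
--     """
--     # Construire le graphe d'égalité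
--     eq_graph = defaultdict(set)
--     for attr1, attr2 in eq_pairs:
--         eq_graph[attr1].add(attr2)
--         eq_graph[attr2].add(attr1)
--
--     # Vérifier que chaque attribut n'apparaît pas deux fois dans des contraintes différentes
--     # qui pourraient créer des égalités transitives contradictoires
--     attr_count = Counter(attr for pair in eq_pairs for attr in pair)
--
--     # Un attribut ne peut pas apparaître dans plus de 2 contraintes
--     for attr, count in attr_count.items():
--         if count > 2:
--             # Vérifier si les attributs liés forment un cycle incohérent
--             visited = set([attr])
--             for neighbor in eq_graph[attr]:
--                 if has_cycle(eq_graph, neighbor, visited, None):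
--                     return False
--
--     return True
--
-- def has_cycle(eq_graph, current, visited, parent):
--     """
--     Détecte les cycles dans le graphe d'égalité qui pourraient indiquer une incohérence.
--
--     :param eq_graph: Graphe d'égalité sous forme de dictionnaire d'adjacence
--     :param current: Nœud actuel
--     :param visited: Ensemble des nœuds visités
--     :param parent: Nœud parent du nœud actuel
--     :return: True si un cycle est détecté, False sinon
--     """
--     visited.add(current)
--
--     for neighbor in eq_graph[current]:
--         if neighbor != parent:
--             if neighbor in visited:
--                 return True
--             if has_cycle(eq_graph, neighbor, visited, current):
--                 return True
--
--     return False
-- ===== SOURCE B (Python) =====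
-- from collections import Counter
--
-- def is_consistent_constraint_set(eq_pairs):
--     # One pass: an attribute taking part in more than 2 constraint slots always
--     # trips A's DFS (the starting attribute is a visited neighbour of any of its
--     # neighbours), so consistency is exactly "no attribute counted more than twice".
--     counts = Counter()
--     for a, b in eq_pairs:
--         counts[a] += 1
--         counts[b] += 1
--     return all(c <= 2 for c in counts.values())
-- ===== Notes on version B (the rewrite author's own statement) =====
-- stated objective: simpler
-- what changed: Drops the equality-graph and recursive DFS entirely: since any attribute with count > 2 has a neighbour whose neighbour set contains the already-visited start, A's cycle check always fires, so B is a single Counter pass returning all(count <= 2).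
import Mathlib
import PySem

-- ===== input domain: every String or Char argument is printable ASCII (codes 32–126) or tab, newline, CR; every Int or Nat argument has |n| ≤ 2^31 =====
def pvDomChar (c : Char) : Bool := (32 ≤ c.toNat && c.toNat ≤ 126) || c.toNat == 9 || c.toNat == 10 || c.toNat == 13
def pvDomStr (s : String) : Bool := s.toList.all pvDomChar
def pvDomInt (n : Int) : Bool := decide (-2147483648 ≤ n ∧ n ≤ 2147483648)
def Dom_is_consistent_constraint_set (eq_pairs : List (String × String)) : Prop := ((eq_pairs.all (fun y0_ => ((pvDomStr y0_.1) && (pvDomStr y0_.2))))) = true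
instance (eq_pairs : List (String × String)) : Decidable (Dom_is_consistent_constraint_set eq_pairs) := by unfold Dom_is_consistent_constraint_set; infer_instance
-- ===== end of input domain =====

-- B replaces A's equality-graph + recursive DFS with a single counting pass; equivalence is proved below.
-- (A iterates Python sets, but its result is order-independent, which the proof establishes.)

-- ===== PORT A =====
-- eq_graph[x].add(y) on a defaultdict(set): modify with default empty set
def pvStep (d : PySem.Dict String (PySem.Set String)) (p : String × String) :
    PySem.Dict String (PySem.Set String) :=
  let d1 := d.modify p.1 PySem.Set.empty (fun s => PySem.Set.add s p.2)
  d1.modify p.2 PySem.Set.empty (fun s => PySem.Set.add s p.1)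

mutual
-- has_cycle, with a fuel guard for totality (fuel never runs out on calls A makes)
def hasCycleA (g : PySem.Dict String (PySem.Set String)) :
    Nat → String → PySem.Set String → Option String → Bool × PySem.Set String
  | 0, _, visited, _ => (true, visited)
  | fuel+1, current, visited, parent =>
      goA g fuel (g.getD current PySem.Set.empty) (PySem.Set.add visited current) parent current
termination_by fuel _ _ _ => (fuel, 0, 0)
-- the 'for neighbor in eq_graph[current]' loop of has_cycle
def goA (g : PySem.Dict String (PySem.Set String)) :
    Nat → List String → PySem.Set String → Option String → String → Bool × PySem.Set String
  | _, [], v, _, _ => (false, v)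
  | fuel, nb :: rest, v, parent, current =>
      if some nb ≠ parent then
        if nb ∈ v then (true, v)
        else
          let r := hasCycleA g fuel nb v (some current)
          if r.1 then (true, r.2) else goA g fuel rest r.2 parent current
      else goA g fuel rest v parent current
termination_by fuel l _ _ _ => (fuel, 1, l.length)
end

-- 'for neighbor in eq_graph[attr]: if has_cycle(...): return False'
def innerA (g : PySem.Dict String (PySem.Set String)) (fuel : Nat) :
    List String → PySem.Set String → Bool
  | [], _ => false
  | n :: rest, v =>
      let r := hasCycleA g fuel n v none
      if r.1 then true else innerA g fuel rest r.2

-- 'for attr, count in attr_count.items(): if count > 2: ...'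
def outerA (g : PySem.Dict String (PySem.Set String)) (fuel : Nat) :
    List (String × Int) → Bool
  | [] => true
  | (attr, count) :: rest =>
      if 2 < count then
        if innerA g fuel (g.getD attr PySem.Set.empty) (PySem.Set.ofList [attr]) then false
        else outerA g fuel rest
      else outerA g fuel rest

def is_consistent_constraint_set (eq_pairs : List (String × String)) : Bool :=
  let eq_graph := eq_pairs.foldl pvStep PySem.Dict.empty
  let attr_count := PySem.Dict.counter (eq_pairs.flatMap (fun p => [p.1, p.2]))
  outerA eq_graph (2 * eq_pairs.length + 1) attr_count.items

-- ===== PORT B =====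
def is_consistent_constraint_set_alt (eq_pairs : List (String × String)) : Bool :=
  let counts := eq_pairs.foldl
    (fun d p =>
      let d1 := d.insert p.1 (d.getD p.1 0 + 1)
      d1.insert p.2 (d1.getD p.2 0 + 1))
    (PySem.Dict.empty : PySem.Dict String Int)
  counts.values.all (fun c => c ≤ 2)

-- ===== PRECONDITION & SPEC =====
def Spec_is_consistent_constraint_set (eq_pairs : List (String × String)) (out : Bool) : Prop := out = is_consistent_constraint_set_alt eq_pairs
instance (eq_pairs : List (String × String)) (out : Bool) : Decidable (Spec_is_consistent_constraint_set eq_pairs out) := by unfold Spec_is_consistent_constraint_set; infer_instance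

-- ===== CLAIM (what is proved, stated in full; the proofs are below) =====
def Claim_equal_is_consistent_constraint_set : Prop := ∀ (eq_pairs : List (String × String)), Dom_is_consistent_constraint_set eq_pairs → Spec_is_consistent_constraint_set eq_pairs (is_consistent_constraint_set eq_pairs)

-- ===== LEMMAS AND PROOFS =====

-- membership through one graph-building step
lemma mem_pvStep (d : PySem.Dict String (PySem.Set String)) (p : String × String) (x y : String) :
    y ∈ (pvStep d p).getD x PySem.Set.empty ↔
      y ∈ d.getD x PySem.Set.empty ∨ (x = p.1 ∧ y = p.2) ∨ (x = p.2 ∧ y = p.1) := by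
  simp only [pvStep, PySem.Dict.getD_modify]
  split_ifs with h1 h2 h2 <;>
    (try simp only [PySem.Set.mem_add]) <;> subst_eqs <;> simp_all

lemma foldl_symm (l : List (String × String)) :
    ∀ (d : PySem.Dict String (PySem.Set String)),
      (∀ x y, y ∈ d.getD x PySem.Set.empty → x ∈ d.getD y PySem.Set.empty) →
      ∀ x y, y ∈ (l.foldl pvStep d).getD x PySem.Set.empty →
        x ∈ (l.foldl pvStep d).getD y PySem.Set.empty := by
  induction l with
  | nil => intro d hd x y h; exact hd x y h
  | cons p rest ih =>
      intro d hd x y h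
      refine ih (pvStep d p) ?_ x y h
      intro a b hb
      rw [mem_pvStep] at hb ⊢
      rcases hb with hb | ⟨rfl, rfl⟩ | ⟨rfl, rfl⟩
      · exact Or.inl (hd a b hb)
      · tauto
      · tauto

-- the built graph is symmetric
lemma graph_symm (eq_pairs : List (String × String)) (x y : String) :
    y ∈ (eq_pairs.foldl pvStep PySem.Dict.empty).getD x PySem.Set.empty →
    x ∈ (eq_pairs.foldl pvStep PySem.Dict.empty).getD y PySem.Set.empty := by
  refine foldl_symm eq_pairs _ ?_ x y
  intro a b hb
  simp [PySem.Dict.getD_empty] at hb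

lemma foldl_occ (l : List (String × String)) :
    ∀ (d : PySem.Dict String (PySem.Set String)) (a : String),
      (a ∈ l.flatMap (fun p => [p.1, p.2]) ∨ ∃ b, b ∈ d.getD a PySem.Set.empty) →
      ∃ b, b ∈ (l.foldl pvStep d).getD a PySem.Set.empty := by
  induction l with
  | nil => intro d a h; simpa using h
  | cons p rest ih =>
      intro d a h
      refine ih (pvStep d p) a ?_
      rcases h with h | ⟨b, hb⟩
      · simp only [List.flatMap_cons, List.mem_append] at h
        rcases h with h | h
        · right
          simp only [List.mem_cons, List.not_mem_nil, or_false] at h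
          rcases h with rfl | rfl
          · exact ⟨p.2, (mem_pvStep d p _ _).2 (Or.inr (Or.inl ⟨rfl, rfl⟩))⟩
          · exact ⟨p.1, (mem_pvStep d p _ _).2 (Or.inr (Or.inr ⟨rfl, rfl⟩))⟩
        · exact Or.inl h
      · exact Or.inr ⟨b, (mem_pvStep d p a b).2 (Or.inl hb)⟩

-- every attribute occurring in a pair has a neighbour
lemma graph_occ (eq_pairs : List (String × String)) (a : String)
    (h : a ∈ eq_pairs.flatMap (fun p => [p.1, p.2])) :
    ∃ b, b ∈ (eq_pairs.foldl pvStep PySem.Dict.empty).getD a PySem.Set.empty :=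
  foldl_occ eq_pairs _ a (Or.inl h)

-- visited only grows
lemma mono_go (g : PySem.Dict String (PySem.Set String)) (fuel : Nat)
    (hc : ∀ cur v p, ∀ x ∈ v, x ∈ (hasCycleA g fuel cur v p).2) :
    ∀ (l : List String) v p cur, ∀ x ∈ v, x ∈ (goA g fuel l v p cur).2 := by
  intro l
  induction l with
  | nil => intro v p cur x hx; simpa [goA] using hx
  | cons nb rest ih =>
      intro v p cur x hx
      simp only [goA]
      split_ifs with h1 h2 h3
      · exact hx
      · exact hc nb v (some cur) x hx
      · exact ih _ p cur x (hc nb v (some cur) x hx)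
      · exact ih v p cur x hx

lemma mono_hasCycle (g : PySem.Dict String (PySem.Set String)) :
    ∀ (fuel : Nat) cur v p, ∀ x ∈ v, x ∈ (hasCycleA g fuel cur v p).2 := by
  intro fuel
  induction fuel with
  | zero => intro cur v p x hx; simpa [hasCycleA] using hx
  | succ fuel ih =>
      intro cur v p x hx
      simp only [hasCycleA]
      exact mono_go g fuel ih _ _ p cur x ((PySem.Set.mem_add _ _ _).2 (Or.inl hx))

-- a visited non-parent neighbour in the list forces True
lemma goA_true (g : PySem.Dict String (PySem.Set String)) (fuel : Nat)
    (l : List String) :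
    ∀ (v : PySem.Set String) (p : Option String) (cur t : String),
    t ∈ l → some t ≠ p → t ∈ v → (goA g fuel l v p cur).1 = true := by
  induction l with
  | nil => intro v p cur t ht; cases ht
  | cons nb rest ih =>
      intro v p cur t ht hp hv
      simp only [goA]
      split_ifs with h1 h2 h3
      · rfl
      · rfl
      · rcases List.mem_cons.1 ht with rfl | ht'
        · exact absurd hv h2
        · exact ih _ p cur t ht' hp (mono_hasCycle g fuel nb v (some cur) t hv)
      · rcases List.mem_cons.1 ht with rfl | ht'
        · exact absurd hp (by simpa using h1)
        · exact ih v p cur t ht' hp hv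

lemma hasCycleA_true (g : PySem.Dict String (PySem.Set String)) (fuel : Nat)
    (n : String) (v : PySem.Set String) (t : String)
    (ht : t ∈ g.getD n PySem.Set.empty) (hv : t ∈ v) :
    (hasCycleA g fuel n v none).1 = true := by
  cases fuel with
  | zero => simp [hasCycleA]
  | succ fuel =>
      simp only [hasCycleA]
      exact goA_true g fuel _ _ none n t ht (by simp) ((PySem.Set.mem_add _ _ _).2 (Or.inl hv))

-- the first neighbour of an over-counted attribute already detects the start as visited
lemma innerA_true (g : PySem.Dict String (PySem.Set String)) (fuel : Nat) (attr : String)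
    (hne : ∃ b, b ∈ g.getD attr PySem.Set.empty)
    (hs : ∀ b ∈ g.getD attr PySem.Set.empty, attr ∈ g.getD b PySem.Set.empty) :
    innerA g fuel (g.getD attr PySem.Set.empty) (PySem.Set.ofList [attr]) = true := by
  obtain ⟨b, hb⟩ := hne
  rcases hl : (g.getD attr PySem.Set.empty : List String) with _ | ⟨n0, rest⟩
  · rw [hl] at hb; cases hb
  · simp only [innerA]
    have hmem : n0 ∈ g.getD attr PySem.Set.empty := by rw [hl]; simp
    have : (hasCycleA g fuel n0 (PySem.Set.ofList [attr]) none).1 = true :=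
      hasCycleA_true g fuel n0 _ attr (hs n0 hmem) (by simp [PySem.Set.mem_ofList])
    simp [this]

lemma outerA_eq_all (g : PySem.Dict String (PySem.Set String)) (fuel : Nat)
    (items : List (String × Int))
    (H : ∀ q ∈ items, 2 < q.2 →
      innerA g fuel (g.getD q.1 PySem.Set.empty) (PySem.Set.ofList [q.1]) = true) :
    outerA g fuel items = items.all (fun q => q.2 ≤ 2) := by
  induction items with
  | nil => rfl
  | cons q rest ih =>
      obtain ⟨attr, c⟩ := q
      simp only [outerA, List.all_cons]
      by_cases h2 : 2 < c
      · rw [if_pos h2, H (attr, c) (by simp) h2, if_pos rfl]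
        have : decide (c ≤ 2) = false := by simp; omega
        simp [this]
      · rw [if_neg h2, ih (fun q hq => H q (List.mem_cons_of_mem _ hq))]
        have : decide (c ≤ 2) = true := by simp; omega
        simp [this]

-- a fold over the pairs doing two steps is the fold over the flattened list
lemma foldl_pair_flat {β : Type} (step : β → String → β) (l : List (String × String)) :
    ∀ (d : β), l.foldl (fun d p => step (step d p.1) p.2) d
      = (l.flatMap (fun p => [p.1, p.2])).foldl step d := by
  induction l with
  | nil => intro d; rfl
  | cons p rest ih => intro d; simp only [List.foldl_cons, List.flatMap_cons, List.foldl_append]; exact ih _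

-- B's insert-per-pair fold is the Counter of the flattened pairs
lemma counts_eq_counter (eq_pairs : List (String × String)) :
    eq_pairs.foldl
      (fun d p => (d.insert p.1 (d.getD p.1 0 + 1)).insert p.2
        ((d.insert p.1 (d.getD p.1 0 + 1)).getD p.2 0 + 1))
      PySem.Dict.empty
    = PySem.Dict.counter (eq_pairs.flatMap (fun p => [p.1, p.2])) := by
  rw [← PySem.Dict.foldl_insert_getD_add_one_eq_counter]
  exact foldl_pair_flat (fun (d : PySem.Dict String Int) x => d.insert x (d.getD x 0 + 1)) eq_pairs _

-- ===== VERDICT (by name: the statement is the Claim_ definition above) =====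
theorem is_consistent_constraint_set_spec : Claim_equal_is_consistent_constraint_set := by
  intro eq_pairs _
  unfold Spec_is_consistent_constraint_set
  simp only [is_consistent_constraint_set, is_consistent_constraint_set_alt]
  simp only [counts_eq_counter]
  rw [outerA_eq_all]
  · simp [PySem.Dict.values, List.all_map, Function.comp_def]
  · intro q hq h2
    refine innerA_true _ _ _ ?_ (fun b hb => graph_symm eq_pairs q.1 b hb)
    refine graph_occ eq_pairs q.1 ?_
    have := PySem.Dict.mem_keys_of_mem_items _ hq
    rw [PySem.Dict.keys_counter] at this
    exact (PySem.Set.mem_ofList _ _).1 this
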